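-- pv_equiv track=rewrite | github.com/MrBrantCode/unitest_baseline | mut_generate/mist_train_cf/cf_97329/solution.py | sum_after_removal
-- ===== SOURCE A (Python) =====
-- def sum_after_removal(array, index):
--     """
--     Remove the element at the specified index from the array,
--     calculate the sum of the remaining elements, and apply
--     the given rules.
--
--     Args:
--     array (list): A list of integers.
--     index (int): The index of the element to be removed.
--
--     Returns:
--     int: The modified sum of the remaining elements.
--     """
--
--     # Remove the element at the specified index
--     removed_element = array.pop(index)
--
--     # Calculate sum of remaining elements in the array
--     sum_of_elements = sum(array)
--
--     # Check conditions based on the removed element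
--     if removed_element > 10:
--         sum_of_elements *= 2
--     elif 5 <= removed_element <= 10:
--         sum_of_elements = sum(element - 1 for element in array)
--     else:
--         sum_of_elements += sum(range(len(array)))
--
--     return sum_of_elements
-- ===== SOURCE B (Python) =====
-- def sum_after_removal(array, index):
--     # Same pop mutation and IndexError as A; branches use closed-form arithmetic
--     # over one hoisted sum instead of iterating sub-computations.
--     removed = array.pop(index)
--     s = sum(array)
--     n = len(array)
--     if removed > 10:
--         return s * 2
--     if 5 <= removed <= 10:
--         return s - n
--     return s + n * (n - 1) // 2
-- ===== Notes on version B (the rewrite author's own statement) =====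
-- stated objective: simpler
-- what changed: B hoists one sum/length and replaces the two iterating sub-computations (the generator sum of element-1 and sum(range(len))) with closed-form arithmetic: s - n and s + n*(n-1)//2.
import Mathlib
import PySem

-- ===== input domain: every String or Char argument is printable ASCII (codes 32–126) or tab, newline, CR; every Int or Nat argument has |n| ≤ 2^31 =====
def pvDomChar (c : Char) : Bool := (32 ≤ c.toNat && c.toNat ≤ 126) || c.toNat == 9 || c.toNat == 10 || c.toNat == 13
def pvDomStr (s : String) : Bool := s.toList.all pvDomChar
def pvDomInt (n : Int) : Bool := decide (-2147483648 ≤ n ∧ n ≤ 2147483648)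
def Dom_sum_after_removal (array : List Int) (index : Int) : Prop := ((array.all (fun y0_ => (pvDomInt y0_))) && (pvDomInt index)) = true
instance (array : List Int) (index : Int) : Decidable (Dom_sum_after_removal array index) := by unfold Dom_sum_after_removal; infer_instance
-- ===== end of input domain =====

-- B replaces A's two iterating branch sub-computations by closed-form arithmetic over one
-- hoisted sum (objective: simpler). Both A and B pop from the argument list in place in
-- Python; the equivalence proved here is about the return value.

-- ===== PORT A =====
def sum_after_removal (array : List Int) (index : Int) : Int :=
  match PySem.List.pop? array index with
  | none => 0   -- unreachable under Pre_: Python raises IndexError here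
  | some (removed_element, rest) =>
    let sum_of_elements := rest.foldl (· + ·) 0
    if removed_element > 10 then sum_of_elements * 2
    else if 5 ≤ removed_element ∧ removed_element ≤ 10 then
      (rest.map (fun element => element - 1)).foldl (· + ·) 0
    else sum_of_elements + (PySem.List.pyRange 0 (rest.length : Int) 1).foldl (· + ·) 0

-- ===== PORT B =====
def sum_after_removal_alt (array : List Int) (index : Int) : Int :=
  match PySem.List.pop? array index with
  | none => 0   -- unreachable under Pre_
  | some (removed, rest) =>
    let s := rest.foldl (· + ·) 0
    let n : Int := rest.length
    if removed > 10 then s * 2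
    else if 5 ≤ removed ∧ removed ≤ 10 then s - n
    else s + PySem.Int.floordiv (n * (n - 1)) 2

-- ===== PRECONDITION & SPEC =====
-- Pre_ excludes exactly the inputs where array.pop(index) raises IndexError.
def Pre_sum_after_removal (array : List Int) (index : Int) : Prop :=
  -(array.length : Int) ≤ index ∧ index < (array.length : Int)
instance (array : List Int) (index : Int) : Decidable (Pre_sum_after_removal array index) := by
  unfold Pre_sum_after_removal; infer_instance
def pvWitness_sum_after_removal : List Int × Int := ([3, 7, 12], 1)

def Spec_sum_after_removal (array : List Int) (index : Int) (out : Int) : Prop := out = sum_after_removal_alt array index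
instance (array : List Int) (index : Int) (out : Int) : Decidable (Spec_sum_after_removal array index out) := by unfold Spec_sum_after_removal; infer_instance

-- ===== CLAIM (what is proved, stated in full; the proofs are below) =====
def Claim_equal_sum_after_removal : Prop := ∀ (array : List Int) (index : Int), Dom_sum_after_removal array index → Pre_sum_after_removal array index → Spec_sum_after_removal array index (sum_after_removal array index)

-- ===== LEMMAS AND PROOFS =====

lemma foldl_sub_one (l : List Int) (acc : Int) :
    (l.map (fun e => e - 1)).foldl (· + ·) acc = l.foldl (· + ·) acc - l.length := by
  rw [PySem.List.foldl_add (g := fun x => x), PySem.List.foldl_add (g := fun x => x)]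
  simp only [List.map_id']
  have h : (l.map (fun e => e - 1)).sum = l.sum - l.length := by
    induction l with
    | nil => simp
    | cons x xs ih => simp [ih]; ring
  rw [h]; ring

lemma range_sum_ediv (n : Nat) :
    (PySem.List.pyRange 0 (n : Int) 1).foldl (· + ·) 0 = (n : Int) * ((n : Int) - 1) / 2 := by
  induction n with
  | zero => simp
  | succ m ih =>
    have h : (0 : Int) ≤ (m : Int) := by positivity
    rw [show ((m + 1 : Nat) : Int) = (m : Int) + 1 by push_cast; ring,
        PySem.List.pyRange_one_succ_right h, List.foldl_append, ih]
    simp only [List.foldl]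
    rw [show ((m : Int) + 1) * ((m : Int) + 1 - 1) = (m : Int) * ((m : Int) - 1) + 2 * (m : Int) by ring]
    omega

lemma foldl_range_sum (n : Nat) :
    (PySem.List.pyRange 0 (n : Int) 1).foldl (· + ·) 0 = PySem.Int.floordiv ((n : Int) * ((n : Int) - 1)) 2 := by
  rw [PySem.Int.floordiv_eq_ediv_of_pos (by norm_num : (0:Int) < 2)]
  exact range_sum_ediv n

theorem sum_after_removal_spec : Claim_equal_sum_after_removal := by
  intro array index _ hpre
  unfold Spec_sum_after_removal sum_after_removal sum_after_removal_alt
  cases hp : PySem.List.pop? array index with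
  | none => rfl
  | some r =>
    obtain ⟨removed, rest⟩ := r
    simp only
    split_ifs with h1 h2
    · rfl
    · exact foldl_sub_one rest 0
    · rw [foldl_range_sum rest.length]
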